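-- pv_equiv track=rewrite | github.com/ulfgtm/hilel | HW 9.py | new_my_list_return
-- ===== SOURCE A (Python) =====
-- def new_my_list_return(my_list):
--     new_list = []
--     for index, symbol in enumerate(my_list):
--         if not index % 2:
--             new_list.append(symbol[::-1])
--         else:
--             new_list.append(symbol)
--     return new_list
-- ===== SOURCE B (Python) =====
-- def new_my_list_return(my_list):
--     new_list = list(my_list)
--     for i in range(0, len(my_list), 2):
--         new_list[i] = new_list[i][::-1]
--     return new_list
-- ===== Notes on version B (the rewrite author's own statement) =====
-- stated objective: alternative
-- what changed: B shallow-copies the input and overwrites only the even positions via a stride-2 range loop, instead of A's full enumerate pass that rebuilds the list with a parity branch per element.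
import Mathlib
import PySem

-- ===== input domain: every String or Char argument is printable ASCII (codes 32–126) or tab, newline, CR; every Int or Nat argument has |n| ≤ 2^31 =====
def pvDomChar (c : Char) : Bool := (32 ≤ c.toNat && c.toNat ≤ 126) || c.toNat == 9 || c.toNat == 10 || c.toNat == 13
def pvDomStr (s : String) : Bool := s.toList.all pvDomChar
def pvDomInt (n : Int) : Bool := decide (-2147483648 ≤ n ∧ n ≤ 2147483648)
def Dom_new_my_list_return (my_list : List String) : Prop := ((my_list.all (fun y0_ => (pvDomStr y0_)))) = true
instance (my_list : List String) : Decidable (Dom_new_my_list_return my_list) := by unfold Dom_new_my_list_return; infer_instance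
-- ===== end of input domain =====

-- B copies the input and overwrites only the even positions with a stride-2 range loop,
-- instead of A's full enumerate pass with a parity branch; same cost, different decomposition.


-- ===== PORT A =====
-- symbol[::-1]: full-string slice with step -1; step ≠ 0, so Str.slice? always returns some
def pyRev (s : String) : String := (PySem.Str.slice? s none none (-1)).getD ""

def new_my_list_return (my_list : List String) : List String :=
  (PySem.List.enumerate my_list 0).foldl
    (fun new_list p =>
      if PySem.Int.mod p.1 2 == 0 then new_list ++ [pyRev p.2]
      else new_list ++ [p.2]) []

-- ===== PORT B =====
def new_my_list_return_alt (my_list : List String) : List String :=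
  (PySem.List.pyRange 0 my_list.length 2).foldl
    (fun new_list i => new_list.set i.toNat (pyRev (new_list.getD i.toNat ""))) my_list

-- ===== PRECONDITION & SPEC =====
def Spec_new_my_list_return (my_list : List String) (out : List String) : Prop := out = new_my_list_return_alt my_list
instance (my_list : List String) (out : List String) : Decidable (Spec_new_my_list_return my_list out) := by unfold Spec_new_my_list_return; infer_instance

-- ===== CLAIM (what is proved, stated in full; the proofs are below) =====
def Claim_equal_new_my_list_return : Prop := ∀ (my_list : List String), Dom_new_my_list_return my_list → Spec_new_my_list_return my_list (new_my_list_return my_list)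

-- ===== LEMMAS AND PROOFS =====

-- the common reference value: reverse at even positions, two elements at a time
def fspec : List String → List String
  | [] => []
  | [a] => [pyRev a]
  | a :: b :: t => pyRev a :: b :: fspec t

-- A side ------------------------------------------------------------------

theorem A_foldl (l : List String) (s : Int) (acc : List String) :
    (PySem.List.enumerate l s).foldl
      (fun new_list p =>
        if PySem.Int.mod p.1 2 == 0 then new_list ++ [pyRev p.2]
        else new_list ++ [p.2]) acc
    = acc ++ (PySem.List.enumerate l s).map
        (fun p => if PySem.Int.mod p.1 2 == 0 then pyRev p.2 else p.2) := by
  induction l generalizing s acc with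
  | nil => simp [PySem.List.enumerate_nil]
  | cons a t ih =>
    rw [PySem.List.enumerate_cons]
    simp only [List.foldl_cons, List.map_cons, ih]
    split <;> simp

theorem A_eq_fspec_aux (l : List String) (s : Int) (hs : s % 2 = 0) :
    (PySem.List.enumerate l s).map
      (fun p => if PySem.Int.mod p.1 2 == 0 then pyRev p.2 else p.2) = fspec l := by
  induction l using fspec.induct generalizing s with
  | case1 => simp [PySem.List.enumerate_nil, fspec]
  | case2 a =>
    have e0 : (PySem.Int.mod s 2 == 0) = true := by
      rw [PySem.Int.mod_eq_emod_of_pos (by norm_num)]; simp [hs]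
    simp [PySem.List.enumerate_cons, PySem.List.enumerate_nil, fspec]
    intro h
    exact absurd hs (by omega)
  | case3 a b t ih =>
    have e0 : (PySem.Int.mod s 2 == 0) = true := by
      rw [PySem.Int.mod_eq_emod_of_pos (by norm_num)]; simp [hs]
    have e1 : (PySem.Int.mod (s + 1) 2 == 0) = false := by
      rw [PySem.Int.mod_eq_emod_of_pos (by norm_num)]; simp; omega
    rw [PySem.List.enumerate_cons, PySem.List.enumerate_cons]
    simp only [List.map_cons, e0, e1, if_true, Bool.false_eq_true, if_false]
    rw [ih (s + 1 + 1) (by omega)]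
    rfl

theorem A_eq_fspec (l : List String) : new_my_list_return l = fspec l := by
  unfold new_my_list_return
  rw [A_foldl, A_eq_fspec_aux l 0 (by decide)]
  simp

-- B side ------------------------------------------------------------------

-- the step function of B's loop
def bstep (nl : List String) (i : Int) : List String :=
  nl.set i.toNat (pyRev (nl.getD i.toNat ""))

theorem bstep_shift (r : List Int) (hr : ∀ i ∈ r, 0 ≤ i) (x y : String) (t : List String) :
    (r.map (· + 2)).foldl bstep (x :: y :: t) = x :: y :: r.foldl bstep t := by
  induction r generalizing t with
  | nil => simp
  | cons i r ih =>
    have hi : 0 ≤ i := hr i (by simp)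
    have : bstep (x :: y :: t) (i + 2) = x :: y :: bstep t i := by
      unfold bstep
      have h2 : (i + 2).toNat = i.toNat + 2 := by omega
      simp [h2]
    simp only [List.map_cons, List.foldl_cons, this]
    exact ih (fun j hj => hr j (by simp [hj])) _

theorem pyRange_two_step (m : Nat) :
    PySem.List.pyRange 0 ((m : Int) + 2) 2
      = 0 :: (PySem.List.pyRange 0 (m : Int) 2).map (· + 2) := by
  rw [PySem.List.pyRange_of_pos _ _ (by norm_num),
      PySem.List.pyRange_of_pos _ _ (by norm_num)]
  have hc : (if (0:Int) < (m : Int) + 2 then ((((m:Int) + 2) - 0 + 2 - 1) / 2).toNat else 0)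
      = (if (0:Int) < (m : Int) then (((m:Int) - 0 + 2 - 1) / 2).toNat else 0) + 1 := by
    split <;> split <;> omega
  rw [hc, List.range_succ_eq_map]
  simp only [List.map_cons, List.map_map]
  refine List.cons_eq_cons.mpr ⟨by norm_num, ?_⟩
  apply List.map_congr_left
  intro k _
  simp [Function.comp]
  ring

theorem B_eq_fspec_aux (l : List String) :
    (PySem.List.pyRange 0 (l.length : Int) 2).foldl bstep l = fspec l := by
  induction l using fspec.induct with
  | case1 => simp [PySem.List.pyRange, fspec]
  | case2 a =>
    have : PySem.List.pyRange 0 ((1:Nat) : Int) 2 = [0] := by decide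
    simp only [List.length_singleton, this, List.foldl_cons, List.foldl_nil]
    simp [bstep, fspec]
  | case3 a b t ih =>
    have hlen : ((a :: b :: t).length : Int) = (t.length : Int) + 2 := by
      simp; ring
    rw [hlen, pyRange_two_step, List.foldl_cons]
    have h0 : bstep (a :: b :: t) 0 = pyRev a :: b :: t := by
      simp [bstep]
    rw [h0, bstep_shift _ (fun i hi => by
      rcases (PySem.List.mem_pyRange_iff_of_pos (by norm_num) i).1 hi with ⟨h, _⟩
      exact h)]
    simp [fspec, ih]

theorem B_eq_fspec (l : List String) : new_my_list_return_alt l = fspec l :=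
  B_eq_fspec_aux l

-- ===== VERDICT (by name: the statement is the Claim_ definition above) =====
theorem new_my_list_return_spec : Claim_equal_new_my_list_return := by
  intro l _
  unfold Spec_new_my_list_return
  rw [A_eq_fspec, B_eq_fspec]
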